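-- pv_equiv track=rewrite | github.com/iarcanar/MBB_Dalamud | python-app/style_preview.py | _split_by_tagged_names
-- ===== SOURCE A (Python) =====
-- def _split_by_tagged_names(text, tagged_names):
--     """Split text by names, preserving their tag (char/lore)."""
--     if not tagged_names:
--         return [('normal', text)]
--     result = []
--     remaining = text
--     while remaining:
--         earliest_pos = len(remaining)
--         earliest_name = None
--         earliest_tag = None
--         for name, tag in tagged_names:
--             pos = remaining.find(name)
--             if pos != -1 and pos < earliest_pos:
--                 earliest_pos = pos
--                 earliest_name = name
--                 earliest_tag = tag
--         if earliest_name is None: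
--             result.append(('normal', remaining))
--             break
--         if earliest_pos > 0:
--             result.append(('normal', remaining[:earliest_pos]))
--         result.append((earliest_tag, earliest_name))
--         remaining = remaining[earliest_pos + len(earliest_name):]
--     return result
-- ===== SOURCE B (Python) =====
-- def _split_by_tagged_names(text, tagged_names):
--     """Lazy next-occurrence merge: cache each name's next match position in the
--     full text and advance an index, instead of re-searching every name over a
--     freshly sliced remainder for every segment."""
--     if not tagged_names:
--         return [('normal', text)]
--     result = []
--     i = 0
--     n = len(text)
--     nxt = [text.find(name) for name, _ in tagged_names]
--     while i < n:
--         bpos = n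
--         best = None
--         for k, (pair, p) in enumerate(zip(tagged_names, nxt)):
--             if p != -1 and p < i:
--                 p = text.find(pair[0], i)
--                 nxt[k] = p
--             if p != -1 and p < bpos:
--                 bpos = p
--                 best = pair
--         if best is None:
--             result.append(('normal', text[i:]))
--             break
--         name, tag = best
--         if bpos > i:
--             result.append(('normal', text[i:bpos]))
--         result.append((tag, name))
--         i = bpos + len(name)
--     return result
-- ===== Notes on version B (the rewrite author's own statement) =====
-- stated objective: alternative
-- what changed: A re-slices the remaining text and re-runs str.find for every name on that fresh slice at every segment; B keeps a single advancing index into the full text with a cached next-occurrence position per name, refreshing a cache entry lazily (and only when it has fallen behind the index) and never slicing the remainder.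
-- outside the precondition, e.g. on _split_by_tagged_names('ab', [('ab', 'char'), ('', 'lore')]): A returns [('char', 'ab')], B returns [('char', 'ab')]
import Mathlib
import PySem

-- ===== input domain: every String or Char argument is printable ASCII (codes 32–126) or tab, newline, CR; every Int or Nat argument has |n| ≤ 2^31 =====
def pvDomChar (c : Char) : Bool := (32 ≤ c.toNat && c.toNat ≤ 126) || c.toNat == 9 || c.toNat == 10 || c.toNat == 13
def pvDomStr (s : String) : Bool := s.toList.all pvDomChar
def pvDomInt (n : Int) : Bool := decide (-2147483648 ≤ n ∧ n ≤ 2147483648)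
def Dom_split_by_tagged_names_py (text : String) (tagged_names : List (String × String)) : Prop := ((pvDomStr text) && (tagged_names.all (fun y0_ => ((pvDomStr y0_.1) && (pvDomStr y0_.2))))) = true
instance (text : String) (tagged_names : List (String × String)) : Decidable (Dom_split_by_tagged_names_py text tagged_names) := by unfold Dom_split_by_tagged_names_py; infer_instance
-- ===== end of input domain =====

-- B replaces A's per-segment re-slice and re-search of every name by a single advancing
-- index with a cached next-occurrence position per name; return values proved equal under Pre_.

-- ===== PORT A =====
-- one step of A's inner `for name, tag in tagged_names` loop (state = (earliest_pos, earliest name/tag))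
def pvFindStep (rem : List Char) (st : Int × Option (String × String)) (p : String × String) :
    Int × Option (String × String) :=
  let pos := PySem.Chars.find rem p.1.toList
  if pos ≠ -1 ∧ pos < st.1 then (pos, some p) else st

-- A's `while remaining:` loop; `result.append`s become cons onto acc, reversed at exit.
-- The `name.toList.length = 0` guard only makes the recursion total: there Python's loop
-- never terminates (an empty name is found at position 0 and consumes nothing); Pre_ excludes it.
def pvLoopA (tn : List (String × String)) (rem : List Char) (acc : List (String × String)) :
    List (String × String) :=
  if hrem : rem = [] then acc.reverse
  else
    match tn.foldl (pvFindStep rem) ((rem.length : Int), none) with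
    | (_, none) => (("normal", String.ofList rem) :: acc).reverse
    | (pos, some (name, tag)) =>
      if _hk : name.toList.length = 0 then acc.reverse
      else
        pvLoopA tn (rem.drop (pos.toNat + name.toList.length))
          ((tag, name) :: (if 0 < pos then ("normal", String.ofList (rem.take pos.toNat)) :: acc else acc))
termination_by rem.length
decreasing_by
  simp only [List.length_drop]
  have h0 : 0 < rem.length := List.length_pos_iff.mpr hrem
  omega

def split_by_tagged_names_py (text : String) (tagged_names : List (String × String)) :
    List (String × String) :=
  if tagged_names = [] then [("normal", text)]
  else pvLoopA tagged_names text.toList []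

-- ===== PORT B =====
-- B's `p = nxt[k]; if p != -1 and p < i: p = text.find(pair[0], i)` (the lazy cache refresh)
def pvQ (txt : List Char) (i : Nat) (pr : (String × String) × Int) : Int :=
  if pr.2 ≠ -1 ∧ pr.2 < (i : Int) then PySem.Chars.findFrom txt pr.1.1.toList (i : Int) none
  else pr.2

-- B's inner `for k, (pair, p) in enumerate(zip(tagged_names, nxt))` loop: refreshes the
-- cache (rebuilt as a new list) while threading the running (bpos, best) minimum.
def pvRefresh (txt : List Char) (i : Nat) :
    List ((String × String) × Int) → Int → Option (String × String) →
    List Int × Int × Option (String × String)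
  | [], bpos, best => ([], bpos, best)
  | pr :: rest, bpos, best =>
    let p := pvQ txt i pr
    let st := if p ≠ -1 ∧ p < bpos then (p, some pr.1) else (bpos, best)
    let r := pvRefresh txt i rest st.1 st.2
    (p :: r.1, r.2)

-- B's `while i < n:` loop.  The `bpos.toNat + name.toList.length ≤ i` guard only makes the
-- recursion total: there Python B's loop never terminates (an empty name is selected and the
-- index does not advance); Pre_ excludes it.
def pvLoopB (txt : List Char) (tn : List (String × String)) (i : Nat) (nxt : List Int)
    (acc : List (String × String)) : List (String × String) :=
  if hi : i < txt.length then
    match pvRefresh txt i (tn.zip nxt) (txt.length : Int) none with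
    | (_, _, none) =>
      (("normal", String.ofList (PySem.List.slice txt (some (i : Int)) none)) :: acc).reverse
    | (nxt', bpos, some (name, tag)) =>
      if hguard : bpos.toNat + name.toList.length ≤ i then acc.reverse
      else
        pvLoopB txt tn (bpos.toNat + name.toList.length) nxt'
          ((tag, name) ::
            (if (i : Int) < bpos then
              ("normal", String.ofList (PySem.List.slice txt (some (i : Int)) (some bpos))) :: acc
            else acc))
  else acc.reverse
termination_by txt.length - i
decreasing_by omega

def split_by_tagged_names_py_alt (text : String) (tagged_names : List (String × String)) :
    List (String × String) :=
  if tagged_names = [] then [("normal", text)]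
  else
    pvLoopB text.toList tagged_names 0
      (tagged_names.map (fun p => PySem.Chars.find text.toList p.1.toList)) []

-- ===== PRECONDITION & SPEC =====
-- Pre_ excludes nonempty texts paired with a tagged-names list containing the empty string:
-- there an empty name can be selected (it is found at position 0 relative to the remainder
-- and consumes nothing) and Python A loops forever (B too).  On some such inputs A still
-- returns (another listed name wins every tie) — see claim.json "cites".
def Pre_split_by_tagged_names_py (text : String) (tagged_names : List (String × String)) : Prop :=
  text = "" ∨ ∀ p ∈ tagged_names, p.1 ≠ ""
instance (text : String) (tagged_names : List (String × String)) :
    Decidable (Pre_split_by_tagged_names_py text tagged_names) := by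
  unfold Pre_split_by_tagged_names_py; infer_instance

def pvWitness_split_by_tagged_names_py : String × (List (String × String)) :=
  ("Hi Bob, see lore!", [("Bob", "char"), ("lore", "lore")])

def Spec_split_by_tagged_names_py (text : String) (tagged_names : List (String × String)) (out : List (String × String)) : Prop := out = split_by_tagged_names_py_alt text tagged_names
instance (text : String) (tagged_names : List (String × String)) (out : List (String × String)) : Decidable (Spec_split_by_tagged_names_py text tagged_names out) := by unfold Spec_split_by_tagged_names_py; infer_instance

-- ===== CLAIM (what is proved, stated in full; the proofs are below) =====
def Claim_equal_split_by_tagged_names_py : Prop := ∀ (text : String) (tagged_names : List (String × String)), Dom_split_by_tagged_names_py text tagged_names → Pre_split_by_tagged_names_py text tagged_names → Spec_split_by_tagged_names_py text tagged_names (split_by_tagged_names_py text tagged_names)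

-- ===== LEMMAS AND PROOFS =====

-- find points at d when d is an occurrence and nothing earlier is
theorem pvFind_eq (s sub : List Char) (d : Nat) (hpre : sub <+: s.drop d)
    (hmin : ∀ j < d, ¬ sub <+: s.drop j) : PySem.Chars.find s sub = (d : Int) := by
  have hin : PySem.Chars.isIn sub s = true :=
    (PySem.Chars.exists_prefix_drop_iff_isIn sub s).mp ⟨d, hpre⟩
  have hne : PySem.Chars.find s sub ≠ -1 :=
    (PySem.Chars.find_ne_neg_one_iff s sub).mpr ((PySem.Chars.isIn_iff_infix sub s).mp hin)
  have h0 : 0 ≤ PySem.Chars.find s sub := by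
    have := PySem.Chars.neg_one_le_find s sub; omega
  obtain ⟨hp, hm⟩ := PySem.Chars.find_spec (s := s) (sub := sub) h0
  rcases Nat.lt_trichotomy (PySem.Chars.find s sub).toNat d with h | h | h
  · exact absurd hp (hmin _ h)
  · omega
  · exact absurd hpre (hm d h)

-- the cache invariant: nxt's entry p for a name, relative to the current index i
def pvCache (txt : List Char) (i : Nat) (name : String) (p : Int) : Prop :=
  (p = -1 → PySem.Chars.find (txt.drop i) name.toList = -1) ∧
  (p ≠ -1 → 0 ≤ p ∧ ((i : Int) ≤ p → p = (i : Int) + PySem.Chars.find (txt.drop i) name.toList))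

-- after the refresh, the entry is exactly A's find on the remainder (shifted by i)
def pvPost (txt : List Char) (i : Nat) (name : String) (q : Int) : Prop :=
  (q = -1 ∧ PySem.Chars.find (txt.drop i) name.toList = -1) ∨
  (0 ≤ PySem.Chars.find (txt.drop i) name.toList ∧
    q = (i : Int) + PySem.Chars.find (txt.drop i) name.toList)

theorem pvQ_post (txt : List Char) (i : Nat) (hi : i ≤ txt.length)
    (pr : (String × String) × Int) (hc : pvCache txt i pr.1.1 pr.2) :
    pvPost txt i pr.1.1 (pvQ txt i pr) := by
  unfold pvQ pvPost
  by_cases hcond : pr.2 ≠ -1 ∧ pr.2 < (i : Int)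
  · rw [if_pos hcond]
    rw [PySem.Chars.findFrom_natCast txt pr.1.1.toList i hi]
    by_cases hf : PySem.Chars.find (txt.drop i) pr.1.1.toList = -1
    · rw [if_pos hf]; exact Or.inl ⟨rfl, hf⟩
    · rw [if_neg hf]
      have := PySem.Chars.neg_one_le_find (txt.drop i) pr.1.1.toList
      exact Or.inr ⟨by omega, rfl⟩
  · rw [if_neg hcond]
    by_cases hp : pr.2 = -1
    · exact Or.inl ⟨hp, hc.1 hp⟩
    · have h2 := hc.2 hp
      have hge : (i : Int) ≤ pr.2 := by
        rcases not_and_or.mp hcond with h | h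
        · exact absurd hp (by simpa using h)
        · omega
      have heq := h2.2 hge
      refine Or.inr ⟨by omega, heq⟩

theorem pvPost_cache (txt : List Char) (i i' : Nat) (hii : i ≤ i') (name : String) (q : Int)
    (hp : pvPost txt i name q) : pvCache txt i' name q := by
  rcases hp with ⟨hq, hf⟩ | ⟨hf, hq⟩
  · refine ⟨fun _ => ?_, fun hne => absurd hq hne⟩
    rw [PySem.Chars.find_eq_neg_one_iff] at hf ⊢
    intro hinf
    exact hf (hinf.trans (List.IsSuffix.isInfix (by
      rw [show txt.drop i' = (txt.drop i).drop (i' - i) from by rw [List.drop_drop]; congr 1; omega]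
      exact List.drop_suffix _ _)))
  · constructor
    · intro h; omega
    · intro _
      refine ⟨by omega, fun hge => ?_⟩
      -- q = i + f is an occurrence, with none in [i, q); so none in [i', q) either
      obtain ⟨hocc, hmin⟩ := PySem.Chars.find_spec (s := txt.drop i) (sub := name.toList) hf
      have hdd : ∀ (m : Nat), (txt.drop i).drop m = txt.drop (i + m) := fun m => by
        rw [List.drop_drop]
      have hocc' : name.toList <+: (txt.drop i').drop (q.toNat - i') := by
        rw [show (txt.drop i').drop (q.toNat - i') = txt.drop (i' + (q.toNat - i')) from by
          rw [List.drop_drop]]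
        rw [show i' + (q.toNat - i') = i + (PySem.Chars.find (txt.drop i) name.toList).toNat from by omega]
        rw [← hdd]
        exact hocc
      have hmin' : ∀ j < q.toNat - i', ¬ name.toList <+: (txt.drop i').drop j := by
        intro j hj
        rw [show (txt.drop i').drop j = txt.drop (i' + j) from by rw [List.drop_drop]]
        rw [show i' + j = i + (i' + j - i) from by omega]
        rw [← hdd]
        exact hmin (i' + j - i) (by omega)
      have := pvFind_eq (txt.drop i') name.toList (q.toNat - i') hocc' hmin'
      rw [this]; omega

-- A's fold keeps a nonnegative position, and when it has selected a name the
-- position is that name's find on the remainder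
theorem pvFold_inv (rem : List Char) (tn : List (String × String)) :
    ∀ st : Int × Option (String × String),
    (0 ≤ st.1 ∧ ∀ q, st.2 = some q → PySem.Chars.find rem q.1.toList = st.1) →
    (0 ≤ (tn.foldl (pvFindStep rem) st).1 ∧
      ∀ q, (tn.foldl (pvFindStep rem) st).2 = some q →
        PySem.Chars.find rem q.1.toList = (tn.foldl (pvFindStep rem) st).1) := by
  induction tn with
  | nil => intro st h; exact h
  | cons p rest ih =>
    intro st h
    rw [List.foldl_cons]
    refine ih _ ?_
    unfold pvFindStep
    by_cases hc : PySem.Chars.find rem p.1.toList ≠ -1 ∧ PySem.Chars.find rem p.1.toList < st.1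
    · rw [if_pos hc]
      have := PySem.Chars.neg_one_le_find rem p.1.toList
      exact ⟨by have := hc.1; omega, fun q hq => by injection hq with hq; subst hq; rfl⟩
    · rw [if_neg hc]; exact h

-- B's refresh loop mirrors A's fold step by step (absolute = i + relative)
theorem pvRefresh_corr (txt : List Char) (i : Nat) :
    ∀ (ps : List ((String × String) × Int)) (stA : Int × Option (String × String)),
    (∀ pr ∈ ps, pvPost txt i pr.1.1 (pvQ txt i pr)) →
    pvRefresh txt i ps ((i : Int) + stA.1) stA.2 =
      (ps.map (pvQ txt i),
       (i : Int) + ((ps.map Prod.fst).foldl (pvFindStep (txt.drop i)) stA).1,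
       ((ps.map Prod.fst).foldl (pvFindStep (txt.drop i)) stA).2) := by
  intro ps
  induction ps with
  | nil => intro stA _; rfl
  | cons pr rest ih =>
    intro stA hposts
    have hpost := hposts pr (by simp)
    rw [List.map_cons, List.map_cons, List.foldl_cons, pvRefresh]
    have hstep : (if pvQ txt i pr ≠ -1 ∧ pvQ txt i pr < (i : Int) + stA.1
          then (pvQ txt i pr, some pr.1) else ((i : Int) + stA.1, stA.2)) =
        ((i : Int) + (pvFindStep (txt.drop i) stA pr.1).1, (pvFindStep (txt.drop i) stA pr.1).2) := by
      unfold pvFindStep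
      rcases hpost with ⟨hq, hf⟩ | ⟨hf, hq⟩
      · rw [if_neg (by simp [hq]), if_neg (by simp [hf])]
      · have hcond : (pvQ txt i pr ≠ -1 ∧ pvQ txt i pr < (i : Int) + stA.1) ↔
            (PySem.Chars.find (txt.drop i) pr.1.1.toList ≠ -1 ∧
             PySem.Chars.find (txt.drop i) pr.1.1.toList < stA.1) := by
          constructor
          · intro h; exact ⟨by omega, by omega⟩
          · intro h; exact ⟨by omega, by omega⟩
        by_cases hc : PySem.Chars.find (txt.drop i) pr.1.1.toList ≠ -1 ∧
            PySem.Chars.find (txt.drop i) pr.1.1.toList < stA.1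
        · rw [if_pos (hcond.mpr hc), if_pos hc, hq]
        · rw [if_neg (fun h => hc (hcond.mp h)), if_neg hc]
    simp only [hstep]
    rw [ih _ (fun pr' hpr' => hposts pr' (by simp [hpr']))]

-- zipping with the refreshed cache list
theorem pvZip_map (tn : List (String × String)) :
    ∀ (nxt : List Int) (f : (String × String) × Int → Int), nxt.length = tn.length →
    tn.zip ((tn.zip nxt).map f) = (tn.zip nxt).map (fun pr => (pr.1, f pr)) := by
  induction tn with
  | nil => intro nxt f _; simp
  | cons p rest ih =>
    intro nxt f hlen
    match nxt with
    | [] => simp at hlen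
    | q :: nq =>
      simp only [List.zip_cons_cons, List.map_cons]
      rw [ih nq f (by simpa using hlen)]

-- the pair selected by A's fold comes from the list (or was already selected)
theorem pvFold_mem (rem : List Char) :
    ∀ (l : List (String × String)) (st : Int × Option (String × String)) (q : String × String),
    (l.foldl (pvFindStep rem) st).2 = some q → st.2 = some q ∨ q ∈ l := by
  intro l
  induction l with
  | nil => intro st q h; exact Or.inl h
  | cons p rest ih =>
    intro st q h
    rw [List.foldl_cons] at h
    rcases ih _ q h with h2 | h2
    · unfold pvFindStep at h2
      by_cases hc : PySem.Chars.find rem p.1.toList ≠ -1 ∧ PySem.Chars.find rem p.1.toList < st.1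
      · rw [if_pos hc] at h2
        injection h2 with h2; subst h2
        exact Or.inr (by simp)
      · rw [if_neg hc] at h2
        exact Or.inl h2
    · exact Or.inr (by simp [h2])

-- zipping a list with a mapped copy of itself
theorem pvZip_self {α β : Type} :
    ∀ (l : List α) (f : α → β), l.zip (l.map f) = l.map (fun p => (p, f p)) := by
  intro l f
  induction l with
  | nil => simp
  | cons a t ih => simp [ih]

-- main loop equivalence (strong induction packaged as a bound on the remaining length)
theorem pvLoop_eq (txt : List Char) (tn : List (String × String))
    (hne : ∀ p ∈ tn, p.1 ≠ "") :
    ∀ (n i : Nat) (nxt : List Int) (acc : List (String × String)),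
    txt.length - i ≤ n → nxt.length = tn.length →
    (∀ pr ∈ tn.zip nxt, pvCache txt i pr.1.1 pr.2) →
    pvLoopA tn (txt.drop i) acc = pvLoopB txt tn i nxt acc := by
  intro n
  induction n with
  | zero =>
    intro i nxt acc hn _ _
    rw [pvLoopA, dif_pos (List.drop_eq_nil_iff.mpr (by omega)), pvLoopB.eq_def, dif_neg (by omega)]
  | succ n ih =>
    intro i nxt acc hn hlen hcache
    by_cases hi : i < txt.length
    · have hrem : txt.drop i ≠ [] := by
        simp only [ne_eq, List.drop_eq_nil_iff]; omega
      rw [pvLoopA, dif_neg hrem, pvLoopB.eq_def, dif_pos hi]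
      have hposts : ∀ pr ∈ tn.zip nxt, pvPost txt i pr.1.1 (pvQ txt i pr) :=
        fun pr hpr => pvQ_post txt i (le_of_lt hi) pr (hcache pr hpr)
      have hmapfst : (tn.zip nxt).map Prod.fst = tn :=
        List.map_fst_zip (by omega)
      have hinit : (txt.length : Int) = (i : Int) + (((txt.drop i).length : Nat) : Int) := by
        simp only [List.length_drop]; omega
      have hcorr := pvRefresh_corr txt i (tn.zip nxt)
        ((((txt.drop i).length : Nat) : Int), none) hposts
      rw [hmapfst] at hcorr
      rw [hinit, hcorr]
      rcases hst : tn.foldl (pvFindStep (txt.drop i)) ((((txt.drop i).length : Nat) : Int), none)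
        with ⟨posI, stq⟩
      have hinv := pvFold_inv (txt.drop i) tn ((((txt.drop i).length : Nat) : Int), none)
        ⟨by simp, by simp⟩
      rw [hst] at hinv
      dsimp only at hinv
      rcases stq with _ | ⟨name, tag⟩
      · -- nothing matches: both emit the whole remainder
        dsimp only
        rw [PySem.List.slice_from_natCast]
      · -- (name, tag) selected at relative position posI
        dsimp only
        have hpos0 : 0 ≤ posI := hinv.1
        have hfq : PySem.Chars.find (txt.drop i) name.toList = posI := hinv.2 (name, tag) rfl
        have hmem : (name, tag) ∈ tn := by
          rcases pvFold_mem (txt.drop i) tn _ (name, tag) (by rw [hst]) with h | h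
          · simp at h
          · exact h
        have hlname : name.toList.length ≠ 0 := by
          simpa [List.length_eq_zero_iff, String.toList_eq_nil_iff] using hne (name, tag) hmem
        -- occurrence fits inside the remainder
        have hge0 : 0 ≤ PySem.Chars.find (txt.drop i) name.toList := by omega
        have hocc := (PySem.Chars.find_spec (s := txt.drop i) (sub := name.toList) hge0).1
        have hfit : posI.toNat + name.toList.length ≤ (txt.drop i).length := by
          have hlen2 := hocc.length_le
          simp only [List.length_drop] at hlen2 ⊢
          rw [hfq] at hlen2
          omega
        have htoNat : ((i : Int) + posI).toNat = i + posI.toNat := by omega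
        rw [dif_neg hlname]
        rw [dif_neg (by omega)]
        -- align the accumulators
        have haccEq : (if (i : Int) < (i : Int) + posI then
              ("normal", String.ofList (PySem.List.slice txt (some (i : Int)) (some ((i : Int) + posI)))) :: acc
            else acc) =
            (if 0 < posI then ("normal", String.ofList ((txt.drop i).take posI.toNat)) :: acc else acc) := by
          by_cases hp0 : 0 < posI
          · rw [if_pos (show (i : Int) < (i : Int) + posI by omega), if_pos hp0,
                PySem.List.slice_toNat txt (by omega) (by omega),
                Int.toNat_natCast, htoNat,
                show i + posI.toNat - i = posI.toNat from by omega]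
          · rw [if_neg (by omega), if_neg hp0]
        rw [haccEq]
        -- align the recursive arguments and apply the induction hypothesis
        rw [show (txt.drop i).drop (posI.toNat + name.toList.length) =
            txt.drop (((i : Int) + posI).toNat + name.toList.length) from by
          rw [List.drop_drop, htoNat]; congr 1; omega]
        refine ih (((i : Int) + posI).toNat + name.toList.length) _ _ (by omega)
          (by simp [List.length_zip, hlen]) ?_
        rw [pvZip_map tn nxt (pvQ txt i) hlen]
        intro pr' hpr'
        obtain ⟨pr, hpr, rfl⟩ := List.mem_map.mp hpr'
        exact pvPost_cache txt i _ (by omega) pr.1.1 (pvQ txt i pr) (hposts pr hpr)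
    · rw [pvLoopA, dif_pos (List.drop_eq_nil_iff.mpr (by omega)), pvLoopB.eq_def, dif_neg hi]

-- ===== VERDICT (by name: the statement is the Claim_ definition above) =====
theorem split_by_tagged_names_py_spec : Claim_equal_split_by_tagged_names_py := by
  intro text tn _hdom hpre
  unfold Spec_split_by_tagged_names_py split_by_tagged_names_py split_by_tagged_names_py_alt
  by_cases htn : tn = []
  · rw [if_pos htn, if_pos htn]
  · rw [if_neg htn, if_neg htn]
    rcases hpre with hpre | hpre
    · subst hpre
      rw [show ("" : String).toList = [] from rfl, pvLoopA, dif_pos rfl, pvLoopB.eq_def,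
        dif_neg (by simp)]
    · have hmain := pvLoop_eq text.toList tn hpre text.toList.length 0
        (tn.map (fun p => PySem.Chars.find text.toList p.1.toList)) [] (by omega) (by simp) ?_
      · simpa using hmain
      · rw [pvZip_self]
        intro pr hpr
        obtain ⟨p, hp, rfl⟩ := List.mem_map.mp hpr
        refine ⟨fun h => by simpa using h, fun hne => ⟨?_, fun _ => ?_⟩⟩
        · have := PySem.Chars.neg_one_le_find text.toList p.1.toList; omega
        · simp
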